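-- pv_equiv track=rewrite | github.com/kirdmiv/Code-andother-stuff | lKSH/final/hoca.py | hoca
-- ===== SOURCE A (Python) =====
-- def hodga(n):
--     matrix = [[0] * n for i in range(n)]
--     for i in range(n):
--         for j in range(n):
--             if i == 0 and j == 0:
--                 matrix[0][0] = 1
--             elif i > 0 and j > 0:
--                 matrix[i][j] = matrix[i - 1][j] + matrix[i][j - 1]
--             elif j == 0:
--                 matrix[i][0] = matrix[i - 1][0]
--             elif i == 0:
--                 matrix[0][j] = matrix[0][j - 1]
--     matrix[0][0] = 0
--     return matrix
--
-- def horse(n):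
--     matrix = [[0] * n for i in range(n)]
--     for i in range(n - 1, -1, -1):
--         for j in range(n - 1, -1, -1):
--             if i == n - 1 and j == n - 1:
--                 matrix[n - 1][n - 1] = 1
--             elif i < n - 1 and j < n - 1:
--                 matrix[i][j] = matrix[i + 1][j] + matrix[i][j + 1]
--             elif j == n - 1:
--                 matrix[i][j] = matrix[i + 1][j]
--             elif i == n - 1:
--                 matrix[i][j] = matrix[i][j + 1]
--     matrix[n - 1][n - 1] = 0
--     return matrix
--
-- def hoca(n):
--     if n == 1:
--         return 1
--     else:
--         ans = 0
--         res1 = hodga(n)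
--         res2 = horse(n)
--         for i in range(len(res1)):
--             for j in range(len(res1[i])):
--                 if res1[i][j] and res2[i][j]:
--                     ans += res1[i][j] * res2[i][j]
--                 else:
--                     ans += max(res1[i][j], res2[i][j])
--     return ans
-- ===== SOURCE B (Python) =====
-- def hoca(n):
--     # Closed form: every monotone lattice path through an n x n grid has 2n-1 cells,
--     # so the sum of (paths from start)*(paths to end) over all cells is
--     # (2n-1) * C(2n-2, n-1); A's zeroed corners contribute exactly the same via max().
--     num = 1
--     for k in range(1, n):
--         num *= 2 * n - 1 - k
--     den = 1
--     for k in range(1, n):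
--         den *= k
--     return (2 * n - 1) * (num // den)
-- ===== Notes on version B (the rewrite author's own statement) =====
-- stated objective: faster
-- what changed: Replaced the two O(n^2) dynamic-programming path-count matrices and the O(n^2) product/max summation by the closed form (2n-1)*C(2n-2,n-1), computing the binomial coefficient with two O(n) products and one exact division.
import Mathlib
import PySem

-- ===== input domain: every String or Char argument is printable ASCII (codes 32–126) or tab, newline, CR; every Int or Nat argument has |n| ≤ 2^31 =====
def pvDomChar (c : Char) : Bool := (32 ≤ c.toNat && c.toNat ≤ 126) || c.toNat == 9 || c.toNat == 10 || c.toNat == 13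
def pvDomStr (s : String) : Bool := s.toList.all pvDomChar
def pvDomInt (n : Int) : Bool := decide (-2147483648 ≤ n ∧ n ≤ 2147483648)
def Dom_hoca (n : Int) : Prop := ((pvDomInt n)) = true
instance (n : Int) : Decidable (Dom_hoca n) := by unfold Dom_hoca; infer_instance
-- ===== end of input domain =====

-- B replaces A's two O(n^2) path-count DP matrices and O(n^2) summation by the closed form
-- (2n-1)*C(2n-2,n-1), computed with two O(n) products and one exact division (objective: faster).

-- ===== PORT A =====
-- body of the doubly-nested loop of hodga (the elif chain, in Python's order)
def hodgaBody (m : List (List Int)) (i j : Int) : List (List Int) :=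
  if i = 0 ∧ j = 0 then
    PySem.List.pySetD m 0 (PySem.List.pySetD (PySem.List.pyGetD m 0 []) 0 1)
  else if 0 < i ∧ 0 < j then
    PySem.List.pySetD m i (PySem.List.pySetD (PySem.List.pyGetD m i []) j
      (PySem.List.pyGetD (PySem.List.pyGetD m (i - 1) []) j 0 +
       PySem.List.pyGetD (PySem.List.pyGetD m i []) (j - 1) 0))
  else if j = 0 then
    PySem.List.pySetD m i (PySem.List.pySetD (PySem.List.pyGetD m i []) 0
      (PySem.List.pyGetD (PySem.List.pyGetD m (i - 1) []) 0 0))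
  else if i = 0 then
    PySem.List.pySetD m 0 (PySem.List.pySetD (PySem.List.pyGetD m 0 []) j
      (PySem.List.pyGetD (PySem.List.pyGetD m 0 []) (j - 1) 0))
  else m

def hodga (n : Int) : List (List Int) :=
  let matrix := (PySem.List.pyRange 0 n 1).map (fun _ => PySem.List.pyRepeat [(0 : Int)] n)
  let matrix := (PySem.List.pyRange 0 n 1).foldl (fun m i =>
    (PySem.List.pyRange 0 n 1).foldl (fun m j => hodgaBody m i j) m) matrix
  PySem.List.pySetD matrix 0 (PySem.List.pySetD (PySem.List.pyGetD matrix 0 []) 0 0)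

-- body of the doubly-nested loop of horse
def horseBody (n : Int) (m : List (List Int)) (i j : Int) : List (List Int) :=
  if i = n - 1 ∧ j = n - 1 then
    PySem.List.pySetD m (n - 1) (PySem.List.pySetD (PySem.List.pyGetD m (n - 1) []) (n - 1) 1)
  else if i < n - 1 ∧ j < n - 1 then
    PySem.List.pySetD m i (PySem.List.pySetD (PySem.List.pyGetD m i []) j
      (PySem.List.pyGetD (PySem.List.pyGetD m (i + 1) []) j 0 +
       PySem.List.pyGetD (PySem.List.pyGetD m i []) (j + 1) 0))
  else if j = n - 1 then
    PySem.List.pySetD m i (PySem.List.pySetD (PySem.List.pyGetD m i []) j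
      (PySem.List.pyGetD (PySem.List.pyGetD m (i + 1) []) j 0))
  else if i = n - 1 then
    PySem.List.pySetD m i (PySem.List.pySetD (PySem.List.pyGetD m i []) j
      (PySem.List.pyGetD (PySem.List.pyGetD m i []) (j + 1) 0))
  else m

def horse (n : Int) : List (List Int) :=
  let matrix := (PySem.List.pyRange 0 n 1).map (fun _ => PySem.List.pyRepeat [(0 : Int)] n)
  let matrix := (PySem.List.pyRange (n - 1) (-1) (-1)).foldl (fun m i =>
    (PySem.List.pyRange (n - 1) (-1) (-1)).foldl (fun m j => horseBody n m i j) m) matrix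
  PySem.List.pySetD matrix (n - 1)
    (PySem.List.pySetD (PySem.List.pyGetD matrix (n - 1) []) (n - 1) 0)

def hoca (n : Int) : Int :=
  if n = 1 then 1
  else
    let res1 := hodga n
    let res2 := horse n
    (PySem.List.pyRange 0 (PySem.List.len res1) 1).foldl (fun ans i =>
      (PySem.List.pyRange 0 (PySem.List.len (PySem.List.pyGetD res1 i [])) 1).foldl (fun ans j =>
        let a := PySem.List.pyGetD (PySem.List.pyGetD res1 i []) j 0
        let b := PySem.List.pyGetD (PySem.List.pyGetD res2 i []) j 0
        if a ≠ 0 ∧ b ≠ 0 then ans + a * b else ans + max a b) ans) 0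

-- ===== PORT B =====
def hoca_alt (n : Int) : Int :=
  let num := (PySem.List.pyRange 1 n 1).foldl (fun a k => a * (2 * n - 1 - k)) 1
  let den := (PySem.List.pyRange 1 n 1).foldl (fun a k => a * k) 1
  (2 * n - 1) * PySem.Int.floordiv num den

-- ===== PRECONDITION & SPEC =====
-- Pre_ excludes exactly n ≤ 0, where A raises IndexError (matrix[0][0] on an empty matrix).
def Pre_hoca (n : Int) : Prop := 1 ≤ n
instance (n : Int) : Decidable (Pre_hoca n) := by unfold Pre_hoca; infer_instance
def pvWitness_hoca : Int := 3
def Spec_hoca (n : Int) (out : Int) : Prop := out = hoca_alt n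
instance (n : Int) (out : Int) : Decidable (Spec_hoca n out) := by unfold Spec_hoca; infer_instance

-- ===== CLAIM (what is proved, stated in full; the proofs are below) =====
def Claim_equal_hoca : Prop := ∀ (n : Int), Dom_hoca n → Pre_hoca n → Spec_hoca n (hoca n)

-- ===== LEMMAS AND PROOFS =====

-- the spec matrix N×N with entry f i j
def pvMat (N : Nat) (f : Nat → Nat → Int) : List (List Int) :=
  (List.range N).map (fun i => (List.range N).map (fun j => f i j))

-- number of monotone paths from (0,0) to (i,j) / from (i,j) to (N-1,N-1)
def pvP (i j : Nat) : Int := ((i + j).choose i : Nat)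
def pvQ (N i j : Nat) : Int := (((N - 1 - i) + (N - 1 - j)).choose (N - 1 - i) : Nat)
-- state of hodga's DP while cell (i,j) is about to be processed
def pvGA (i j i' j' : Nat) : Int := if i' < i ∨ (i' = i ∧ j' < j) then pvP i' j' else 0
-- state of horse's DP: rows below r done, row r done at its last s columns
def pvGB (N r s i' j' : Nat) : Int :=
  if r < i' ∨ (i' = r ∧ N - s ≤ j') then pvQ N i' j' else 0

theorem pvMat_congr {N : Nat} {f f' : Nat → Nat → Int}
    (h : ∀ i j, i < N → j < N → f i j = f' i j) : pvMat N f = pvMat N f' := by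
  unfold pvMat
  refine List.map_congr_left (fun i hi => ?_)
  refine List.map_congr_left (fun j hj => ?_)
  exact h i j (List.mem_range.mp hi) (List.mem_range.mp hj)

theorem pvMat_getrow (N : Nat) (f : Nat → Nat → Int) (ii : Int)
    (h1 : 0 ≤ ii) (h2 : ii < (N : Int)) :
    PySem.List.pyGetD (pvMat N f) ii [] = (List.range N).map (f ii.toNat) := by
  have hlen : (pvMat N f).length = N := by simp [pvMat]
  rw [PySem.List.pyGetD_eq_getElem _ _ h1 (by rw [hlen]; exact_mod_cast h2)]
  simp [pvMat]

theorem pvMat_read (N : Nat) (f : Nat → Nat → Int) (ii jj : Int) (d : Int)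
    (h1 : 0 ≤ ii) (h2 : ii < (N : Int)) (h3 : 0 ≤ jj) (h4 : jj < (N : Int)) :
    PySem.List.pyGetD (PySem.List.pyGetD (pvMat N f) ii []) jj d = f ii.toNat jj.toNat := by
  rw [pvMat_getrow N f ii h1 h2]
  rw [PySem.List.pyGetD_eq_getElem _ _ h3 (by simp; exact_mod_cast h4)]
  simp

theorem pvMat_write (N : Nat) (f : Nat → Nat → Int) (ii jj : Int) (v : Int)
    (h1 : 0 ≤ ii) (h2 : ii < (N : Int)) (h3 : 0 ≤ jj) (_h4 : jj < (N : Int)) :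
    PySem.List.pySetD (pvMat N f) ii
      (PySem.List.pySetD (PySem.List.pyGetD (pvMat N f) ii []) jj v)
    = pvMat N (fun a b => if a = ii.toNat ∧ b = jj.toNat then v else f a b) := by
  rw [pvMat_getrow N f ii h1 h2, PySem.List.pySetD_of_nonneg _ _ h3,
    PySem.List.pySetD_of_nonneg _ _ h1]
  refine List.ext_getElem (by simp [pvMat]) ?_
  intro a ha1 ha2
  have haN : a < N := by simp [pvMat] at ha1; omega
  by_cases hai : a = ii.toNat
  · subst hai
    rw [List.getElem_set_self (by simp [pvMat]; omega)]
    refine List.ext_getElem (by simp [pvMat]) ?_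
    intro b hb1 hb2
    have hbN : b < N := by simpa using hb1
    by_cases hbj : b = jj.toNat
    · subst hbj
      rw [List.getElem_set_self (by simp; omega)]
      simp [pvMat]
    · rw [List.getElem_set_ne (by omega)]
      simp [pvMat, hbj]
  · rw [List.getElem_set_ne (by omega)]
    simp only [pvMat, List.getElem_map, List.getElem_range]
    refine List.map_congr_left (fun b hb => ?_)
    simp [hai]

theorem pvP_zero_left (j : Nat) : pvP 0 j = 1 := by simp [pvP]

theorem pvP_zero_right (i : Nat) : pvP i 0 = 1 := by simp [pvP]

theorem pvP_pascal (i j : Nat) (hi : 1 ≤ i) (hj : 1 ≤ j) :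
    pvP (i - 1) j + pvP i (j - 1) = pvP i j := by
  obtain ⟨i', rfl⟩ : ∃ i', i = i' + 1 := ⟨i - 1, by omega⟩
  obtain ⟨j', rfl⟩ : ∃ j', j = j' + 1 := ⟨j - 1, by omega⟩
  have h : (i' + (j' + 1)).choose i' + ((i' + 1) + j').choose (i' + 1)
      = ((i' + 1) + (j' + 1)).choose (i' + 1) := by
    rw [show i' + (j' + 1) = i' + j' + 1 by omega, show (i' + 1) + j' = i' + j' + 1 by omega,
      show (i' + 1) + (j' + 1) = (i' + j' + 1) + 1 by omega]
    exact (Nat.choose_succ_succ (i' + j' + 1) i').symm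
  simp only [pvP, Nat.add_sub_cancel]
  exact_mod_cast h

theorem pvGA_step_ne (i j a b : Nat) (h : ¬(a = i ∧ b = j)) :
    pvGA i j a b = pvGA i (j + 1) a b := by
  unfold pvGA; split_ifs with h1 h2 <;> first | rfl | omega

theorem hodga_step (N i j : Nat) (hi : i < N) (hj : j < N) :
    hodgaBody (pvMat N (pvGA i j)) (i : Int) (j : Int) = pvMat N (pvGA i (j + 1)) := by
  unfold hodgaBody
  rcases Nat.eq_zero_or_pos i with hi1 | hi1
  · rcases Nat.eq_zero_or_pos j with hj1 | hj1
    · -- i = 0, j = 0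
      subst hi1; subst hj1
      rw [if_pos ⟨by simp, by simp⟩,
        pvMat_write N _ 0 0 1 (by omega) (by omega) (by omega) (by omega)]
      refine pvMat_congr (fun a b ha hb => ?_)
      simp only [Int.toNat_zero, pvGA, pvP]
      split_ifs <;> simp_all
    · -- i = 0, 1 ≤ j
      subst hi1
      rw [if_neg (by omega), if_neg (by omega), if_neg (by omega), if_pos (by simp),
        pvMat_read N _ 0 ((j : Int) - 1) 0 (by omega) (by omega) (by omega) (by omega),
        pvMat_write N _ 0 (j : Int) _ (by omega) (by omega) (by omega) (by omega)]
      refine pvMat_congr (fun a b ha hb => ?_)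
      have e1 : ((j : Int) - 1).toNat = j - 1 := by omega
      simp only [Int.toNat_zero, Int.toNat_natCast, e1]
      have v1 : pvGA 0 j 0 (j - 1) = pvP 0 (j - 1) := if_pos (Or.inr ⟨rfl, by omega⟩)
      by_cases hab : a = 0 ∧ b = j
      · obtain ⟨ha', hb'⟩ := hab
        rw [if_pos ⟨ha', hb'⟩, ha', hb', v1, pvP_zero_left,
          show pvGA 0 (j + 1) 0 j = pvP 0 j from if_pos (Or.inr ⟨rfl, by omega⟩), pvP_zero_left]
      · rw [if_neg hab, pvGA_step_ne 0 j a b hab]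
  · rcases Nat.eq_zero_or_pos j with hj1 | hj1
    · -- 1 ≤ i, j = 0
      subst hj1
      rw [if_neg (by omega), if_neg (by omega), if_pos (by simp),
        pvMat_read N _ ((i : Int) - 1) 0 0 (by omega) (by omega) (by omega) (by omega),
        pvMat_write N _ (i : Int) 0 _ (by omega) (by omega) (by omega) (by omega)]
      refine pvMat_congr (fun a b ha hb => ?_)
      have e1 : ((i : Int) - 1).toNat = i - 1 := by omega
      simp only [Int.toNat_zero, Int.toNat_natCast, e1]
      have v1 : pvGA i 0 (i - 1) 0 = pvP (i - 1) 0 := if_pos (Or.inl (by omega))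
      by_cases hab : a = i ∧ b = 0
      · obtain ⟨ha', hb'⟩ := hab
        rw [if_pos ⟨ha', hb'⟩, ha', hb', v1, pvP_zero_right,
          show pvGA i (0 + 1) i 0 = pvP i 0 from if_pos (Or.inr ⟨rfl, by omega⟩), pvP_zero_right]
      · rw [if_neg hab, pvGA_step_ne i 0 a b hab]
    · -- 1 ≤ i, 1 ≤ j
      rw [if_neg (by omega), if_pos (by constructor <;> omega),
        pvMat_read N _ ((i : Int) - 1) (j : Int) 0 (by omega) (by omega) (by omega) (by omega),
        pvMat_read N _ (i : Int) ((j : Int) - 1) 0 (by omega) (by omega) (by omega) (by omega),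
        pvMat_write N _ (i : Int) (j : Int) _ (by omega) (by omega) (by omega) (by omega)]
      refine pvMat_congr (fun a b ha hb => ?_)
      have e1 : ((i : Int) - 1).toNat = i - 1 := by omega
      have e2 : ((j : Int) - 1).toNat = j - 1 := by omega
      simp only [Int.toNat_natCast, e1, e2]
      have v1 : pvGA i j (i - 1) j = pvP (i - 1) j := if_pos (Or.inl (by omega))
      have v2 : pvGA i j i (j - 1) = pvP i (j - 1) := if_pos (Or.inr ⟨rfl, by omega⟩)
      by_cases hab : a = i ∧ b = j
      · obtain ⟨ha', hb'⟩ := hab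
        rw [if_pos ⟨ha', hb'⟩, ha', hb', v1, v2, pvP_pascal i j hi1 hj1,
          show pvGA i (j + 1) i j = pvP i j from if_pos (Or.inr ⟨rfl, by omega⟩)]
      · rw [if_neg hab, pvGA_step_ne i j a b hab]

theorem hodga_inner (N i : Nat) (hi : i < N) : ∀ j, j ≤ N →
    (List.range j).foldl (fun (m : List (List Int)) (k : Nat) => hodgaBody m (i : Int) (k : Int)) (pvMat N (pvGA i 0))
      = pvMat N (pvGA i j) := by
  intro j
  induction j with
  | zero => intro _; simp
  | succ j ih =>
    intro hj
    rw [List.range_succ, List.foldl_append, ih (by omega)]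
    simpa using hodga_step N i j hi (by omega)

theorem hodga_outer (N : Nat) : ∀ i, i ≤ N →
    (List.range i).foldl (fun (m : List (List Int)) (k : Nat) =>
        ((List.range N).map (Nat.cast : Nat → Int)).foldl
          (fun m jj => hodgaBody m (k : Int) jj) m)
      (pvMat N (fun _ _ => 0)) = pvMat N (pvGA i 0) := by
  intro i
  induction i with
  | zero =>
    intro _
    simp only [List.range_zero, List.foldl_nil]
    exact pvMat_congr (fun a b ha hb => by simp [pvGA])
  | succ i ih =>
    intro hi
    rw [List.range_succ, List.foldl_append, ih (by omega)]
    simp only [List.foldl_cons, List.foldl_nil, List.foldl_map]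
    rw [hodga_inner N i (by omega) N (le_refl N)]
    refine pvMat_congr (fun a b ha hb => ?_)
    simp only [pvGA]
    split_ifs <;> first | rfl | omega

theorem hodga_eq (N : Nat) (h : 1 ≤ N) :
    hodga (N : Int) = pvMat N (fun i j => if i = 0 ∧ j = 0 then 0 else pvP i j) := by
  show PySem.List.pySetD _ 0 (PySem.List.pySetD (PySem.List.pyGetD _ 0 []) 0 0) = _
  have hinit : (PySem.List.pyRange 0 (N : Int) 1).map
      (fun _ => PySem.List.pyRepeat [(0 : Int)] (N : Int)) = pvMat N (fun _ _ => 0) := by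
    rw [PySem.List.pyRange_zero_natCast]
    simp only [List.map_map, pvMat]
    refine List.map_congr_left (fun k hk => ?_)
    simp [PySem.List.pyRepeat_singleton, List.map_const']
  rw [hinit, PySem.List.pyRange_zero_natCast, List.foldl_map,
    hodga_outer N N (le_refl N),
    pvMat_write N _ 0 0 0 (by omega) (by omega) (by omega) (by omega)]
  refine pvMat_congr (fun a b ha hb => ?_)
  simp only [Int.toNat_zero]
  split_ifs with h1
  · rfl
  · exact if_pos (by omega)

theorem pv_chooseStep (A B : Nat) :
    ((A + (B + 1)).choose A : Int) + (((A + 1) + B).choose (A + 1) : Nat) =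
      (((A + 1) + (B + 1)).choose (A + 1) : Nat) := by
  have h : (A + (B + 1)).choose A + ((A + 1) + B).choose (A + 1)
      = ((A + 1) + (B + 1)).choose (A + 1) := by
    rw [show A + (B + 1) = A + B + 1 by omega, show (A + 1) + B = A + B + 1 by omega,
      show (A + 1) + (B + 1) = (A + B + 1) + 1 by omega]
    exact (Nat.choose_succ_succ (A + B + 1) A).symm
  exact_mod_cast h

theorem pvQ_last_row (N j : Nat) : pvQ N (N - 1) j = 1 := by
  unfold pvQ; rw [show N - 1 - (N - 1) = 0 from by omega]; simp

theorem pvQ_last_col (N i : Nat) : pvQ N i (N - 1) = 1 := by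
  unfold pvQ; rw [show N - 1 - (N - 1) = 0 from by omega]; simp

theorem pvQ_pascal (N r j : Nat) (hr : r + 1 < N) (hj : j + 1 < N) :
    pvQ N (r + 1) j + pvQ N r (j + 1) = pvQ N r j := by
  unfold pvQ
  rw [show N - 1 - r = (N - 1 - (r + 1)) + 1 from by omega,
    show N - 1 - j = (N - 1 - (j + 1)) + 1 from by omega]
  exact pv_chooseStep (N - 1 - (r + 1)) (N - 1 - (j + 1))

theorem pvGB_step_ne (N r s a b : Nat) (hs : s < N) (h : ¬(a = r ∧ b = N - 1 - s)) :
    pvGB N r s a b = pvGB N r (s + 1) a b := by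
  unfold pvGB; split_ifs with h1 h2 <;> first | rfl | omega

theorem horse_step (N r s : Nat) (hN : 1 ≤ N) (hr : r < N) (hs : s < N) :
    horseBody (N : Int) (pvMat N (pvGB N r s)) (r : Int) ((N - 1 - s : Nat) : Int)
      = pvMat N (pvGB N r (s + 1)) := by
  unfold horseBody
  rcases Nat.lt_or_ge r (N - 1) with hr1 | hr1
  · rcases Nat.eq_zero_or_pos s with hs1 | hs1
    · -- r < N-1, s = 0 : j = n-1, third branch
      subst hs1
      rw [if_neg (by omega), if_neg (by omega), if_pos (by omega),
        pvMat_read N _ ((r : Int) + 1) ((N - 1 - 0 : Nat) : Int) 0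
          (by omega) (by omega) (by omega) (by omega),
        pvMat_write N _ (r : Int) ((N - 1 - 0 : Nat) : Int) _
          (by omega) (by omega) (by omega) (by omega)]
      refine pvMat_congr (fun a b ha hb => ?_)
      have e1 : ((r : Int) + 1).toNat = r + 1 := by omega
      simp only [Int.toNat_natCast, e1]
      have v1 : pvGB N r 0 (r + 1) (N - 1 - 0) = pvQ N (r + 1) (N - 1) := by
        rw [show N - 1 - 0 = N - 1 from by omega]; exact if_pos (Or.inl (by omega))
      by_cases hab : a = r ∧ b = N - 1 - 0
      · obtain ⟨ha', hb'⟩ := hab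
        rw [if_pos ⟨ha', hb'⟩, ha', hb', v1, pvQ_last_col,
          show pvGB N r (0 + 1) r (N - 1 - 0) = pvQ N r (N - 1 - 0) from
            if_pos (Or.inr ⟨rfl, by omega⟩),
          show N - 1 - 0 = N - 1 from by omega, pvQ_last_col]
      · rw [if_neg hab, pvGB_step_ne N r 0 a b (by omega) hab]
    · -- r < N-1, 1 ≤ s : interior, second branch
      rw [if_neg (by omega), if_pos (by constructor <;> omega),
        pvMat_read N _ ((r : Int) + 1) ((N - 1 - s : Nat) : Int) 0
          (by omega) (by omega) (by omega) (by omega),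
        pvMat_read N _ (r : Int) (((N - 1 - s : Nat) : Int) + 1) 0
          (by omega) (by omega) (by omega) (by omega),
        pvMat_write N _ (r : Int) ((N - 1 - s : Nat) : Int) _
          (by omega) (by omega) (by omega) (by omega)]
      refine pvMat_congr (fun a b ha hb => ?_)
      have e1 : ((r : Int) + 1).toNat = r + 1 := by omega
      have e2 : (((N - 1 - s : Nat) : Int) + 1).toNat = (N - 1 - s) + 1 := by omega
      simp only [Int.toNat_natCast, e1, e2]
      have v1 : pvGB N r s (r + 1) (N - 1 - s) = pvQ N (r + 1) (N - 1 - s) :=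
        if_pos (Or.inl (by omega))
      have v2 : pvGB N r s r ((N - 1 - s) + 1) = pvQ N r ((N - 1 - s) + 1) :=
        if_pos (Or.inr ⟨rfl, by omega⟩)
      by_cases hab : a = r ∧ b = N - 1 - s
      · obtain ⟨ha', hb'⟩ := hab
        rw [if_pos ⟨ha', hb'⟩, ha', hb', v1, v2,
          pvQ_pascal N r (N - 1 - s) (by omega) (by omega),
          show pvGB N r (s + 1) r (N - 1 - s) = pvQ N r (N - 1 - s) from
            if_pos (Or.inr ⟨rfl, by omega⟩)]
      · rw [if_neg hab, pvGB_step_ne N r s a b (by omega) hab]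
  · rcases Nat.eq_zero_or_pos s with hs1 | hs1
    · -- r = N-1, s = 0 : corner, first branch
      subst hs1
      have hrN : r = N - 1 := by omega
      rw [if_pos (by omega),
        pvMat_write N _ ((N : Int) - 1) ((N : Int) - 1) 1
          (by omega) (by omega) (by omega) (by omega)]
      refine pvMat_congr (fun a b ha hb => ?_)
      have e1 : ((N : Int) - 1).toNat = N - 1 := by omega
      simp only [e1]
      by_cases hab : a = N - 1 ∧ b = N - 1
      · obtain ⟨ha', hb'⟩ := hab
        rw [if_pos ⟨ha', hb'⟩, ha', hb',
          show pvGB N r (0 + 1) (N - 1) (N - 1) = pvQ N (N - 1) (N - 1) from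
            if_pos (Or.inr ⟨by omega, by omega⟩), pvQ_last_col]
      · rw [if_neg hab, pvGB_step_ne N r 0 a b (by omega) (by omega)]
    · -- r = N-1, 1 ≤ s : last row, fourth branch
      have hrN : r = N - 1 := by omega
      rw [if_neg (by omega), if_neg (by omega), if_neg (by omega), if_pos (by omega),
        pvMat_read N _ (r : Int) (((N - 1 - s : Nat) : Int) + 1) 0
          (by omega) (by omega) (by omega) (by omega),
        pvMat_write N _ (r : Int) ((N - 1 - s : Nat) : Int) _
          (by omega) (by omega) (by omega) (by omega)]
      refine pvMat_congr (fun a b ha hb => ?_)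
      have e2 : (((N - 1 - s : Nat) : Int) + 1).toNat = (N - 1 - s) + 1 := by omega
      simp only [Int.toNat_natCast, e2]
      have v1 : pvGB N r s r ((N - 1 - s) + 1) = pvQ N r ((N - 1 - s) + 1) :=
        if_pos (Or.inr ⟨rfl, by omega⟩)
      by_cases hab : a = r ∧ b = N - 1 - s
      · obtain ⟨ha', hb'⟩ := hab
        rw [if_pos ⟨ha', hb'⟩, ha', hb', v1, hrN, pvQ_last_row,
          show pvGB N (N - 1) (s + 1) (N - 1) (N - 1 - s) = pvQ N (N - 1) (N - 1 - s) from
            if_pos (Or.inr ⟨rfl, by omega⟩), pvQ_last_row]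
      · rw [if_neg hab, pvGB_step_ne N r s a b (by omega) hab]

theorem horse_inner (N r : Nat) (hN : 1 ≤ N) (hr : r < N) : ∀ s, s ≤ N →
    (List.range s).foldl
      (fun (m : List (List Int)) (k : Nat) => horseBody (N : Int) m (r : Int) ((N : Int) - 1 - (k : Int)))
      (pvMat N (pvGB N r 0)) = pvMat N (pvGB N r s) := by
  intro s
  induction s with
  | zero => intro _; simp
  | succ s ih =>
    intro hs
    rw [List.range_succ, List.foldl_append, ih (by omega)]
    simp only [List.foldl_cons, List.foldl_nil]
    rw [show (N : Int) - 1 - (s : Int) = ((N - 1 - s : Nat) : Int) from by omega]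
    exact horse_step N r s hN hr (by omega)

theorem horse_outer (N : Nat) (hN : 1 ≤ N) : ∀ t, t ≤ N →
    (List.range t).foldl (fun (m : List (List Int)) (k : Nat) =>
        ((List.range N).map (fun (k' : Nat) => (N : Int) - 1 - (k' : Int))).foldl
          (fun m jj => horseBody (N : Int) m ((N : Int) - 1 - (k : Int)) jj) m)
      (pvMat N (fun _ _ => 0))
    = pvMat N (fun i' j' => if N - t ≤ i' then pvQ N i' j' else 0) := by
  intro t
  induction t with
  | zero =>
    intro _
    simp only [List.range_zero, List.foldl_nil]
    refine pvMat_congr (fun a b ha hb => ?_)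
    rw [if_neg (by omega)]
  | succ t ih =>
    intro ht
    rw [List.range_succ, List.foldl_append, ih (by omega)]
    simp only [List.foldl_cons, List.foldl_nil, List.foldl_map]
    rw [show (N : Int) - 1 - (t : Int) = ((N - 1 - t : Nat) : Int) from by omega]
    have hin : pvMat N (fun i' j' => if N - t ≤ i' then pvQ N i' j' else 0)
        = pvMat N (pvGB N (N - 1 - t) 0) := by
      refine pvMat_congr (fun a b ha hb => ?_)
      unfold pvGB; split_ifs <;> first | rfl | omega
    rw [hin, horse_inner N (N - 1 - t) hN (by omega) N (le_refl N)]
    refine pvMat_congr (fun a b ha hb => ?_)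
    unfold pvGB; split_ifs <;> first | rfl | omega

theorem horse_eq (N : Nat) (h : 1 ≤ N) :
    horse (N : Int) = pvMat N (fun i j => if i = N - 1 ∧ j = N - 1 then 0 else pvQ N i j) := by
  show PySem.List.pySetD _ ((N : Int) - 1)
      (PySem.List.pySetD (PySem.List.pyGetD _ ((N : Int) - 1) []) ((N : Int) - 1) 0) = _
  have hinit : (PySem.List.pyRange 0 (N : Int) 1).map
      (fun _ => PySem.List.pyRepeat [(0 : Int)] (N : Int)) = pvMat N (fun _ _ => 0) := by
    rw [PySem.List.pyRange_zero_natCast]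
    simp only [List.map_map, pvMat]
    refine List.map_congr_left (fun k hk => ?_)
    simp [PySem.List.pyRepeat_singleton, List.map_const']
  rw [hinit, PySem.List.pyRange_neg_one,
    show ((N : Int) - 1 - (-1)).toNat = N from by omega, List.foldl_map,
    horse_outer N h N (le_refl N),
    pvMat_write N _ ((N : Int) - 1) ((N : Int) - 1) 0 (by omega) (by omega) (by omega) (by omega)]
  refine pvMat_congr (fun a b ha hb => ?_)
  have e1 : ((N : Int) - 1).toNat = N - 1 := by omega
  simp only [e1]
  split_ifs with h1 h2 <;> first | rfl | omega

theorem pv_descAux (n : Nat) : ∀ M, M ≤ n →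
    (List.range M).foldl (fun (a : Int) (k : Nat) => a * ((n : Int) - (k : Int))) 1
      = ((n.descFactorial M : Nat) : Int) := by
  intro M
  induction M with
  | zero => intro _; simp
  | succ M ih =>
    intro hM
    rw [List.range_succ, List.foldl_append, ih (by omega)]
    simp only [List.foldl_cons, List.foldl_nil]
    rw [Nat.descFactorial_succ]
    push_cast [Nat.cast_sub (show M ≤ n by omega)]
    ring

theorem pv_factAux : ∀ M, (List.range M).foldl (fun (a : Int) (k : Nat) => a * (1 + (k : Int))) 1
    = ((M.factorial : Nat) : Int) := by
  intro M
  induction M with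
  | zero => simp
  | succ M ih =>
    rw [List.range_succ, List.foldl_append, ih]
    simp only [List.foldl_cons, List.foldl_nil]
    rw [Nat.factorial_succ]
    push_cast
    ring

-- B's two products are the descending factorial and the factorial
theorem pv_num (N : Nat) (h : 1 ≤ N) :
    (PySem.List.pyRange 1 (N : Int) 1).foldl (fun a k => a * (2 * (N : Int) - 1 - k)) 1
      = (((2 * N - 2).descFactorial (N - 1) : Nat) : Int) := by
  rw [PySem.List.pyRange_one, show ((N : Int) - 1).toNat = N - 1 from by omega, List.foldl_map]
  have hb : (fun (a : Int) (k : Nat) => a * (2 * (N : Int) - 1 - (1 + (k : Int))))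
      = fun (a : Int) (k : Nat) => a * (((2 * N - 2 : Nat) : Int) - (k : Int)) := by
    funext a k
    rw [show 2 * (N : Int) - 1 - (1 + (k : Int)) = ((2 * N - 2 : Nat) : Int) - (k : Int) from by omega]
  rw [hb]
  exact pv_descAux (2 * N - 2) (N - 1) (by omega)

theorem pv_den (N : Nat) :
    (PySem.List.pyRange 1 (N : Int) 1).foldl (fun a k => a * k) 1 = (((N - 1).factorial : Nat) : Int) := by
  rw [PySem.List.pyRange_one, show ((N : Int) - 1).toNat = N - 1 from by omega, List.foldl_map]
  exact pv_factAux (N - 1)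

theorem alt_closed (N : Nat) (h : 1 ≤ N) :
    hoca_alt (N : Int) = (2 * (N : Int) - 1) * (((2 * N - 2).choose (N - 1) : Nat) : Int) := by
  show (2 * (N : Int) - 1) * PySem.Int.floordiv _ _ = _
  rw [pv_num N h, pv_den N, PySem.Int.floordiv_natCast,
    ← Nat.choose_eq_descFactorial_div_factorial]

-- core combinatorial identity: the grid sum of path products, by Vandermonde per antidiagonal
theorem pv_core (N : Nat) (h : 2 ≤ N) :
    (∑ i ∈ Finset.range N, ∑ j ∈ Finset.range N,
        (i + j).choose i * ((N - 1 - i) + (N - 1 - j)).choose (N - 1 - i))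
      = (2 * N - 1) * (2 * N - 2).choose (N - 1) := by
  have hstep1 : ∀ i ∈ Finset.range N, ∀ j ∈ Finset.range N,
      (i + j).choose i * ((N - 1 - i) + (N - 1 - j)).choose (N - 1 - i)
        = (i + j).choose i * (2 * N - 2 - (i + j)).choose (N - 1 - i) := by
    intro i hi j hj
    rw [show (N - 1 - i) + (N - 1 - j) = 2 * N - 2 - (i + j) from by
      have := Finset.mem_range.mp hi; have := Finset.mem_range.mp hj; omega]
  rw [Finset.sum_congr rfl (fun i hi => Finset.sum_congr rfl (fun j hj => hstep1 i hi j hj))]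
  -- reindex the square grid by (antidiagonal index, row)
  rw [← Finset.sum_product']
  refine Eq.trans (Finset.sum_nbij' (fun x => (x.1 + x.2, x.1)) (fun y => (y.2, y.1 - y.2))
    (t := (Finset.range (2 * N - 1) ×ˢ Finset.range N).filter
      (fun y => y.2 ≤ y.1 ∧ y.1 - y.2 < N))
    (g := fun y => y.1.choose y.2 * (2 * N - 2 - y.1).choose (N - 1 - y.2))
    ?_ ?_ ?_ ?_ ?_) ?_
  · intro x hx
    simp only [Finset.mem_product, Finset.mem_range] at hx
    simp only [Finset.mem_filter, Finset.mem_product, Finset.mem_range]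
    omega
  · intro y hy
    simp only [Finset.mem_filter, Finset.mem_product, Finset.mem_range] at hy
    simp only [Finset.mem_product, Finset.mem_range]
    omega
  · intro x hx; simp
  · intro y hy
    rcases y with ⟨k, p⟩
    simp only [Finset.mem_filter, Finset.mem_product, Finset.mem_range] at hy
    obtain ⟨⟨hk1, hp1⟩, hpk, hkp⟩ := hy
    simp only [Prod.ext_iff]
    exact ⟨by omega, by trivial⟩
  · intro x hx; rfl
  rw [Finset.sum_filter_of_ne (by
    intro y hy hne
    simp only [Finset.mem_product, Finset.mem_range] at hy
    by_contra hcon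
    rcases Nat.lt_or_ge y.1 y.2 with hlt | hge
    · exact hne (by rw [Nat.choose_eq_zero_of_lt hlt, Nat.zero_mul])
    · have hz : (2 * N - 2 - y.1).choose (N - 1 - y.2) = 0 :=
        Nat.choose_eq_zero_of_lt (by omega)
      exact hne (by rw [hz, Nat.mul_zero]))]
  rw [Finset.sum_product' (f := fun k p => k.choose p * (2 * N - 2 - k).choose (N - 1 - p))]
  have hVan : ∀ k ∈ Finset.range (2 * N - 1),
      (∑ p ∈ Finset.range N, k.choose p * (2 * N - 2 - k).choose (N - 1 - p))
        = (2 * N - 2).choose (N - 1) := by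
    intro k hk
    have hkle : k ≤ 2 * N - 2 := by
      have := Finset.mem_range.mp hk; omega
    rw [show Finset.range N = Finset.range ((N - 1) + 1) from by rw [show (N - 1) + 1 = N from by omega]]
    rw [← Finset.Nat.sum_antidiagonal_eq_sum_range_succ_mk
      (f := fun ij => k.choose ij.1 * (2 * N - 2 - k).choose ij.2)]
    rw [← Nat.add_choose_eq, show k + (2 * N - 2 - k) = 2 * N - 2 from by omega]
  rw [Finset.sum_congr rfl hVan, Finset.sum_const, Finset.card_range, smul_eq_mul]

-- A's per-cell term (with the two zeroed corners and max) equals the plain path product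
theorem pv_cell (N i j : Nat) (h : 2 ≤ N) (hi : i < N) (hj : j < N) :
    (if (if i = 0 ∧ j = 0 then (0 : Int) else pvP i j) ≠ 0 ∧
        (if i = N - 1 ∧ j = N - 1 then (0 : Int) else pvQ N i j) ≠ 0 then
       (if i = 0 ∧ j = 0 then (0 : Int) else pvP i j) *
         (if i = N - 1 ∧ j = N - 1 then (0 : Int) else pvQ N i j)
     else
       max (if i = 0 ∧ j = 0 then (0 : Int) else pvP i j)
         (if i = N - 1 ∧ j = N - 1 then (0 : Int) else pvQ N i j))
    = pvP i j * pvQ N i j := by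
  have hP : (0 : Int) < pvP i j := by
    unfold pvP; exact_mod_cast Nat.choose_pos (Nat.le_add_right i j)
  have hQ : (0 : Int) < pvQ N i j := by
    unfold pvQ; exact_mod_cast Nat.choose_pos (Nat.le_add_right _ _)
  by_cases h00 : i = 0 ∧ j = 0
  · have hc : ¬(i = N - 1 ∧ j = N - 1) := by omega
    simp only [if_pos h00, if_neg hc]
    rw [if_neg (by simp), max_eq_right hQ.le]
    obtain ⟨rfl, rfl⟩ := h00
    rw [show pvP 0 0 = 1 from pvP_zero_left 0, one_mul]
  · by_cases hc : i = N - 1 ∧ j = N - 1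
    · simp only [if_neg h00, if_pos hc]
      rw [if_neg (by simp), max_eq_left hP.le]
      obtain ⟨rfl, rfl⟩ := hc
      rw [pvQ_last_col, mul_one]
    · simp only [if_neg h00, if_neg hc]
      rw [if_pos ⟨hP.ne', hQ.ne'⟩]

theorem pv_rowlen (N : Nat) (f : Nat → Nat → Int) (i : Nat) (hi : i < N) :
    PySem.List.len (PySem.List.pyGetD (pvMat N f) (i : Int) []) = (N : Int) := by
  rw [pvMat_getrow N f (i : Int) (by omega) (by exact_mod_cast hi)]
  simp [PySem.List.len_eq]

-- ===== VERDICT (by name: the statement is the Claim_ definition above) =====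
theorem hoca_spec : Claim_equal_hoca := by
  intro n _ hpre
  unfold Pre_hoca at hpre
  unfold Spec_hoca
  obtain ⟨N, rfl⟩ : ∃ N : Nat, n = (N : Int) := ⟨n.toNat, by omega⟩
  have hN1 : 1 ≤ N := by omega
  by_cases hN : N = 1
  · subst hN
    simp only [Nat.cast_one]
    decide
  · have hN2 : 2 ≤ N := by omega
    have hunf : hoca (N : Int) =
        (PySem.List.pyRange 0 (PySem.List.len (hodga (N : Int))) 1).foldl (fun ans i =>
          (PySem.List.pyRange 0
              (PySem.List.len (PySem.List.pyGetD (hodga (N : Int)) i [])) 1).foldl (fun ans j =>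
            if PySem.List.pyGetD (PySem.List.pyGetD (hodga (N : Int)) i []) j 0 ≠ 0 ∧
               PySem.List.pyGetD (PySem.List.pyGetD (horse (N : Int)) i []) j 0 ≠ 0 then
              ans + PySem.List.pyGetD (PySem.List.pyGetD (hodga (N : Int)) i []) j 0 *
                PySem.List.pyGetD (PySem.List.pyGetD (horse (N : Int)) i []) j 0
            else
              ans + max (PySem.List.pyGetD (PySem.List.pyGetD (hodga (N : Int)) i []) j 0)
                (PySem.List.pyGetD (PySem.List.pyGetD (horse (N : Int)) i []) j 0)) ans) 0 := by
      unfold hoca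
      rw [if_neg (show ¬((N : Int) = 1) from by omega)]
    rw [hunf, alt_closed N hN1, hodga_eq N hN1, horse_eq N hN1]
    have hlen : PySem.List.len (pvMat N (fun i j => if i = 0 ∧ j = 0 then 0 else pvP i j))
        = (N : Int) := by simp [PySem.List.len_eq, pvMat]
    rw [hlen, PySem.List.pyRange_zero_natCast, List.foldl_map]
    refine Eq.trans (PySem.List.foldl_congr_mem _ _
      (fun (acc : Int) (i : Nat) =>
        acc + ((List.range N).map (fun j => pvP i j * pvQ N i j)).sum) 0 ?_) ?_
    · intro acc i hi
      have hiN : i < N := List.mem_range.mp hi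
      rw [pv_rowlen N _ i hiN, PySem.List.pyRange_zero_natCast, List.foldl_map]
      refine Eq.trans (PySem.List.foldl_congr_mem _ _
        (fun (acc2 : Int) (j : Nat) => acc2 + pvP i j * pvQ N i j) acc ?_) ?_
      · intro acc2 j hj
        have hjN : j < N := List.mem_range.mp hj
        rw [pvMat_read N _ (i : Int) (j : Int) 0
            (by omega) (by exact_mod_cast hiN) (by omega) (by exact_mod_cast hjN),
          pvMat_read N _ (i : Int) (j : Int) 0
            (by omega) (by exact_mod_cast hiN) (by omega) (by exact_mod_cast hjN)]
        simp only [Int.toNat_natCast]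
        rw [← apply_ite (fun t => acc2 + t)]
        rw [pv_cell N i j hN2 hiN hjN]
      · exact PySem.List.foldl_add _ _ _
    · rw [PySem.List.foldl_add, zero_add]
      have hb : ((List.range N).map (fun i =>
            ((List.range N).map (fun j => pvP i j * pvQ N i j)).sum)).sum
          = ((∑ i ∈ Finset.range N, ∑ j ∈ Finset.range N,
              ((i + j).choose i * ((N - 1 - i) + (N - 1 - j)).choose (N - 1 - i)) : Nat) : Int) := by
        show (∑ i ∈ Finset.range N, ∑ j ∈ Finset.range N, pvP i j * pvQ N i j) = _
        rw [Nat.cast_sum]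
        refine Finset.sum_congr rfl fun i _ => ?_
        rw [Nat.cast_sum]
        refine Finset.sum_congr rfl fun j _ => ?_
        unfold pvP pvQ
        exact (Nat.cast_mul _ _).symm
      rw [hb, pv_core N hN2]
      push_cast [Nat.cast_sub (show 1 ≤ 2 * N from by omega)]
      ring
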